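-- pv_equiv track=rewrite | github.com/PieroPaialungaAI/DocumentNumberParser | utils.py | find_k_sum_backtrack
-- ===== SOURCE A (Python) =====
-- def find_k_sum_backtrack(nums, target, k):
--     """
--     Returns all unique k-tuples from nums that sum to target.
--     Uses sorting and backtracking to prune branches early.
--     """
--     results = []
--
--     def backtrack(start, k_remain, target_remain, path):
--         # Base case: found k numbers that sum exactly
--         if k_remain == 0 and target_remain == 0:
--             results.append(tuple(path))
--             return
--         # If no more picks or target impossible, prune
--         if k_remain == 0 or target_remain < 0:
--             return
--
--         for i in range(start, len(nums)):
--             # skip duplicates at the same depth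
--             if i > start and nums[i] == nums[i-1]:
--                 continue
--             # prune if the smallest possible sum is already too big
--             if nums[i] * k_remain > target_remain:
--                 break
--             # prune if the largest possible sum is still too small
--             if nums[-1] * k_remain < target_remain:
--                 break
--
--             # choose nums[i]
--             backtrack(i+1, k_remain-1, target_remain - nums[i], path + [nums[i]])
--
--     backtrack(0, k, target, [])
--     return results
-- ===== SOURCE B (Python) =====
-- def find_k_sum_backtrack(nums, target, k):
--     """
--     Small-step frame machine instead of recursion: a stack holds two kinds of
--     frames -- ("enter", start, k_remain, target_remain, path) for entering a
--     backtracking node, and ("scan", i, start, k_remain, target_remain, path)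
--     for being at position i of that node's candidate scan.  Each pop performs
--     one decision; children are pushed on top of the pending sibling scan, so
--     results appear in the same depth-first order.
--     """
--     n = len(nums)
--     results = []
--     stack = [("enter", 0, k, target, [])]
--     while stack:
--         frame = stack.pop()
--         if frame[0] == "enter":
--             _, s, kr, tr, path = frame
--             if kr == 0 and tr == 0:
--                 results.append(tuple(path))
--             elif kr != 0 and tr >= 0:
--                 stack.append(("scan", s, s, kr, tr, path))
--         else:
--             _, i, s, kr, tr, path = frame
--             if i >= n:
--                 continue
--             if i > s and nums[i] == nums[i - 1]:
--                 stack.append(("scan", i + 1, s, kr, tr, path))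
--             elif nums[i] * kr > tr or nums[-1] * kr < tr:
--                 continue  # the scan breaks: drop the remaining siblings
--             else:
--                 stack.append(("scan", i + 1, s, kr, tr, path))
--                 stack.append(("enter", i + 1, kr - 1, tr - nums[i], path + [nums[i]]))
--     return results
-- ===== Notes on version B (the rewrite author's own statement) =====
-- stated objective: alternative
-- what changed: The recursive backtracking with a mutated results list is replaced by a small-step frame machine: a stack of two kinds of frames ('enter a node' with its base-case tests, and 'scan position i of a node' making one per-index decision per pop), so the per-node for-loop and the recursion both disappear into single-step stack transitions that reproduce A's depth-first output order.
import Mathlib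
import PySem

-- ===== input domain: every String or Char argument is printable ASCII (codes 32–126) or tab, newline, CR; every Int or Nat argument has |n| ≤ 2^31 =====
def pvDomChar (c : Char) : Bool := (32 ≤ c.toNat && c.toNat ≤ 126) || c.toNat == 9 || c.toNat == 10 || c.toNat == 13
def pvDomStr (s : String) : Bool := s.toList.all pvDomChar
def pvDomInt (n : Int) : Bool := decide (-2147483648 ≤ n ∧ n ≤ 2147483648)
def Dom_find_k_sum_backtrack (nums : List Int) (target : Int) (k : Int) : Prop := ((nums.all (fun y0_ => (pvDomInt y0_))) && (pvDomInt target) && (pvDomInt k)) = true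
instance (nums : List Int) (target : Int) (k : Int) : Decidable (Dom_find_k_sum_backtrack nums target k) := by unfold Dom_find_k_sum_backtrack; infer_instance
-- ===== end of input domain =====

-- B replaces A's recursive backtracking by a small-step frame machine (a stack of
-- 'enter node' / 'scan position i' frames, one decision per pop); objective: alternative decomposition.

-- ===== PORT A =====
-- Recursive backtracking, transliterated. `loopA` is `backtrack`'s `for i in range(start, len(nums))` loop
-- (`continue` = recursing on the remaining indices, `break` = returning []); `rec` is the recursive call to `backtrack`;
-- results are returned instead of appended to a global list. `btA` is `backtrack` itself; its `fuel` argument is a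
-- totality guard only (recursion depth is at most nums.length, so fuel nums.length+1 never runs out), and the
-- `i < nums.length` check inside `loopA` only justifies the indexing (every generated index satisfies it).
def loopA (nums : List Int) (rec : Nat → Int → Int → List Int → List (List Int)) :
    List Nat → Nat → Int → Int → List Int → List (List Int)
  | [], _, _, _, _ => []
  | i :: is, start, kr, tr, path =>
    if h : i < nums.length then
      if start < i ∧ nums[i] = nums[i-1]'(by omega) then loopA nums rec is start kr tr path
      else if nums[i] * kr > tr then []
      else if nums[nums.length - 1]'(by omega) * kr < tr then []
      else rec (i+1) (kr-1) (tr - nums[i]) (path ++ [nums[i]]) ++ loopA nums rec is start kr tr path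
    else []

def btA (nums : List Int) : Nat → Nat → Int → Int → List Int → List (List Int)
  | 0, _, _, _, _ => []
  | fuel+1, start, kr, tr, path =>
    if kr = 0 ∧ tr = 0 then [path]
    else if kr = 0 ∨ tr < 0 then []
    else loopA nums (fun s' a b c => btA nums fuel s' a b c)
           (List.range' start (nums.length - start)) start kr tr path

def find_k_sum_backtrack (nums : List Int) (target : Int) (k : Int) : List (List Int) :=
  btA nums (nums.length + 1) 0 k target []

-- ===== PORT B =====
-- Small-step frame machine (Source B): the stack holds `enter` frames ("enter a backtracking
-- node") and `scan` frames ("this node is at position i of its candidate scan"); each pop of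
-- the `while stack:` loop makes ONE decision and pushes at most two frames (child on top of
-- the pending sibling scan). Head of the list = top of Python's list-stack. `runB`'s fuel is
-- a totality guard only: the pop count is bounded by the stack measure proved below, which
-- starts below 3 * 2 ^ nums.length. Python's in-range indexing nums[i] / nums[-1] is getD.
inductive PvFrame : Type
  | enter : Nat → Int → Int → List Int → PvFrame
  | scan : Nat → Nat → Int → Int → List Int → PvFrame
deriving DecidableEq, Repr

def runB (nums : List Int) : Nat → List PvFrame → List (List Int) → List (List Int)
  | 0, _, acc => acc
  | _+1, [], acc => acc
  | fuel+1, PvFrame.enter s kr tr path :: rest, acc =>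
    if kr = 0 ∧ tr = 0 then runB nums fuel rest (acc ++ [path])
    else if kr ≠ 0 ∧ 0 ≤ tr then runB nums fuel (PvFrame.scan s s kr tr path :: rest) acc
    else runB nums fuel rest acc
  | fuel+1, PvFrame.scan i s kr tr path :: rest, acc =>
    if nums.length ≤ i then runB nums fuel rest acc
    else if s < i ∧ nums.getD i 0 = nums.getD (i-1) 0 then
      runB nums fuel (PvFrame.scan (i+1) s kr tr path :: rest) acc
    else if nums.getD i 0 * kr > tr ∨ nums.getD (nums.length - 1) 0 * kr < tr then
      runB nums fuel rest acc
    else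
      runB nums fuel
        (PvFrame.enter (i+1) (kr-1) (tr - nums.getD i 0) (path ++ [nums.getD i 0])
          :: PvFrame.scan (i+1) s kr tr path :: rest) acc

def find_k_sum_backtrack_alt (nums : List Int) (target : Int) (k : Int) : List (List Int) :=
  runB nums (3 * 2 ^ nums.length) [PvFrame.enter 0 k target []] []

-- ===== PRECONDITION & SPEC =====
def Spec_find_k_sum_backtrack (nums : List Int) (target : Int) (k : Int) (out : List (List Int)) : Prop := out = find_k_sum_backtrack_alt nums target k
instance (nums : List Int) (target : Int) (k : Int) (out : List (List Int)) : Decidable (Spec_find_k_sum_backtrack nums target k out) := by unfold Spec_find_k_sum_backtrack; infer_instance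

-- ===== CLAIM (what is proved, stated in full; the proofs are below) =====
def Claim_equal_find_k_sum_backtrack : Prop := ∀ (nums : List Int) (target : Int) (k : Int), Dom_find_k_sum_backtrack nums target k → Spec_find_k_sum_backtrack nums target k (find_k_sum_backtrack nums target k)

-- ===== LEMMAS AND PROOFS =====

-- a frame's weight: popping any frame removes strictly more weight than it pushes
def mFrame (n : Nat) : PvFrame → Nat
  | PvFrame.enter s _ _ _ => 3 * 2 ^ (n - s) - 1
  | PvFrame.scan i _ _ _ _ => 3 * 2 ^ (n - i) - 2

def mStack (n : Nat) (st : List PvFrame) : Nat := (st.map (mFrame n)).sum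

lemma runB_nil (nums : List Int) (f : Nat) (acc : List (List Int)) :
    runB nums f [] acc = acc := by
  cases f <;> rfl

-- the fuel is irrelevant as long as it dominates the stack measure
lemma runB_fuel (nums : List Int) :
    ∀ (f : Nat) (st : List PvFrame) (acc : List (List Int)) (f' : Nat),
    mStack nums.length st ≤ f → mStack nums.length st ≤ f' →
    runB nums f st acc = runB nums f' st acc := by
  intro f
  induction f with
  | zero =>
    intro st acc f' hf _
    cases st with
    | nil => rw [runB_nil, runB_nil]
    | cons fr rest =>
      exfalso
      have h2 : 1 ≤ mFrame nums.length fr := by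
        cases fr with
        | enter s kr tr path =>
          have : 1 ≤ 2 ^ (nums.length - s) := Nat.one_le_two_pow
          simp only [mFrame]; omega
        | scan i s kr tr path =>
          have : 1 ≤ 2 ^ (nums.length - i) := Nat.one_le_two_pow
          simp only [mFrame]; omega
      simp only [mStack, List.map_cons, List.sum_cons] at hf
      omega
  | succ f ih =>
    intro st acc f' hf hf'
    cases st with
    | nil => rw [runB_nil, runB_nil]
    | cons fr rest =>
      cases fr with
      | enter s kr tr path =>
        have h1 : 1 ≤ 2 ^ (nums.length - s) := Nat.one_le_two_pow
        have hexp : mStack nums.length (PvFrame.enter s kr tr path :: rest)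
            = (3 * 2 ^ (nums.length - s) - 1) + mStack nums.length rest := by
          simp [mStack, mFrame]
        rw [hexp] at hf hf'
        cases f' with
        | zero => omega
        | succ f' =>
          rw [runB, runB]
          split_ifs
          · exact ih rest (acc ++ [path]) f' (by omega) (by omega)
          · have hsc : mStack nums.length (PvFrame.scan s s kr tr path :: rest)
                = (3 * 2 ^ (nums.length - s) - 2) + mStack nums.length rest := by
              simp [mStack, mFrame]
            exact ih _ acc f' (by rw [hsc]; omega) (by rw [hsc]; omega)
          · exact ih rest acc f' (by omega) (by omega)
      | scan i s kr tr path =>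
        have h1 : 1 ≤ 2 ^ (nums.length - i) := Nat.one_le_two_pow
        have hexp : mStack nums.length (PvFrame.scan i s kr tr path :: rest)
            = (3 * 2 ^ (nums.length - i) - 2) + mStack nums.length rest := by
          simp [mStack, mFrame]
        rw [hexp] at hf hf'
        cases f' with
        | zero => omega
        | succ f' =>
          rw [runB, runB]
          split_ifs with hle _ _
          · exact ih rest acc f' (by omega) (by omega)
          · have hpow : 2 ^ (nums.length - i) = 2 * 2 ^ (nums.length - (i+1)) := by
              have : nums.length - i = (nums.length - (i+1)) + 1 := by omega
              rw [this, pow_succ]; ring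
            have h1' : 1 ≤ 2 ^ (nums.length - (i+1)) := Nat.one_le_two_pow
            have hsc : mStack nums.length (PvFrame.scan (i+1) s kr tr path :: rest)
                = (3 * 2 ^ (nums.length - (i+1)) - 2) + mStack nums.length rest := by
              simp [mStack, mFrame]
            exact ih _ acc f' (by rw [hsc]; omega) (by rw [hsc]; omega)
          · exact ih rest acc f' (by omega) (by omega)
          · have hpow : 2 ^ (nums.length - i) = 2 * 2 ^ (nums.length - (i+1)) := by
              have : nums.length - i = (nums.length - (i+1)) + 1 := by omega
              rw [this, pow_succ]; ring
            have h1' : 1 ≤ 2 ^ (nums.length - (i+1)) := Nat.one_le_two_pow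
            have hsc : mStack nums.length
                (PvFrame.enter (i+1) (kr-1) (tr - nums.getD i 0) (path ++ [nums.getD i 0])
                  :: PvFrame.scan (i+1) s kr tr path :: rest)
                = (3 * 2 ^ (nums.length - (i+1)) - 1) + ((3 * 2 ^ (nums.length - (i+1)) - 2)
                    + mStack nums.length rest) := by
              simp [mStack, mFrame]
            exact ih _ acc f' (by rw [hsc]; omega) (by rw [hsc]; omega)

-- the three possible steps of A's loop at an in-range index, with getD-phrased conditions
lemma loopA_cons_dup (nums : List Int) (rec : Nat → Int → Int → List Int → List (List Int))
    (i : Nat) (is : List Nat) (start : Nat) (kr tr : Int) (path : List Int)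
    (h : i < nums.length) (hd : start < i ∧ nums.getD i 0 = nums.getD (i-1) 0) :
    loopA nums rec (i :: is) start kr tr path = loopA nums rec is start kr tr path := by
  rw [List.getD_eq_getElem nums 0 h, List.getD_eq_getElem nums 0 (show i-1 < nums.length by omega)] at hd
  rw [loopA, dif_pos h, if_pos hd]

lemma loopA_cons_brk (nums : List Int) (rec : Nat → Int → Int → List Int → List (List Int))
    (i : Nat) (is : List Nat) (start : Nat) (kr tr : Int) (path : List Int)
    (h : i < nums.length) (hd : ¬ (start < i ∧ nums.getD i 0 = nums.getD (i-1) 0))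
    (hb : nums.getD i 0 * kr > tr ∨ nums.getD (nums.length - 1) 0 * kr < tr) :
    loopA nums rec (i :: is) start kr tr path = [] := by
  rw [List.getD_eq_getElem nums 0 h, List.getD_eq_getElem nums 0 (show i-1 < nums.length by omega)] at hd
  rw [List.getD_eq_getElem nums 0 h, List.getD_eq_getElem nums 0 (show nums.length-1 < nums.length by omega)] at hb
  rw [loopA, dif_pos h, if_neg hd]
  rcases hb with hb | hb
  · rw [if_pos hb]
  · by_cases hb1 : nums[i] * kr > tr
    · rw [if_pos hb1]
    · rw [if_neg hb1, if_pos hb]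

lemma loopA_cons_go (nums : List Int) (rec : Nat → Int → Int → List Int → List (List Int))
    (i : Nat) (is : List Nat) (start : Nat) (kr tr : Int) (path : List Int)
    (h : i < nums.length) (hd : ¬ (start < i ∧ nums.getD i 0 = nums.getD (i-1) 0))
    (hb : ¬ (nums.getD i 0 * kr > tr ∨ nums.getD (nums.length - 1) 0 * kr < tr)) :
    loopA nums rec (i :: is) start kr tr path
      = rec (i+1) (kr-1) (tr - nums.getD i 0) (path ++ [nums.getD i 0])
          ++ loopA nums rec is start kr tr path := by
  rw [List.getD_eq_getElem nums 0 h, List.getD_eq_getElem nums 0 (show i-1 < nums.length by omega)] at hd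
  rw [List.getD_eq_getElem nums 0 h] at hb ⊢
  rw [List.getD_eq_getElem nums 0 (show nums.length-1 < nums.length by omega)] at hb
  obtain ⟨hb1, hb2⟩ := not_or.mp hb
  rw [loopA, dif_pos h, if_neg hd, if_neg hb1, if_neg hb2]

-- popping an `enter` frame appends A's backtrack result; popping a `scan` frame appends what
-- A's loop over the remaining indices emits
lemma run_sem (nums : List Int) :
    ∀ (fB : Nat),
    (∀ (s : Nat) (kr tr : Int) (path : List Int) rest acc (fA : Nat),
      mStack nums.length (PvFrame.enter s kr tr path :: rest) ≤ fB →
      s ≤ nums.length → nums.length + 1 - s ≤ fA →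
      runB nums fB (PvFrame.enter s kr tr path :: rest) acc
        = runB nums fB rest (acc ++ btA nums fA s kr tr path))
    ∧
    (∀ (i s : Nat) (kr tr : Int) (path : List Int) rest acc (fA : Nat),
      mStack nums.length (PvFrame.scan i s kr tr path :: rest) ≤ fB →
      nums.length - i ≤ fA →
      runB nums fB (PvFrame.scan i s kr tr path :: rest) acc
        = runB nums fB rest
            (acc ++ loopA nums (fun s' a b c => btA nums fA s' a b c)
                      (List.range' i (nums.length - i)) s kr tr path)) := by
  intro fB
  induction fB with
  | zero =>
    constructor
    · intro s kr tr path rest acc fA hm _ _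
      exfalso
      have h1 : 1 ≤ 2 ^ (nums.length - s) := Nat.one_le_two_pow
      simp only [mStack, mFrame, List.map_cons, List.sum_cons] at hm
      omega
    · intro i s kr tr path rest acc fA hm _
      exfalso
      have h1 : 1 ≤ 2 ^ (nums.length - i) := Nat.one_le_two_pow
      simp only [mStack, mFrame, List.map_cons, List.sum_cons] at hm
      omega
  | succ fB ih =>
    constructor
    · -- enter frame
      intro s kr tr path rest acc fA hm hs hfA
      have h1 : 1 ≤ 2 ^ (nums.length - s) := Nat.one_le_two_pow
      have hexp : mStack nums.length (PvFrame.enter s kr tr path :: rest)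
          = (3 * 2 ^ (nums.length - s) - 1) + mStack nums.length rest := by
        simp [mStack, mFrame]
      rw [hexp] at hm
      obtain ⟨fA', rfl⟩ : ∃ fA', fA = fA' + 1 := ⟨fA - 1, by omega⟩
      rw [runB, btA]
      by_cases hb : kr = 0 ∧ tr = 0
      · rw [if_pos hb, if_pos hb]
        exact runB_fuel nums fB rest (acc ++ [path]) (fB + 1) (by omega) (by omega)
      · rw [if_neg hb, if_neg hb]
        by_cases hc : kr ≠ 0 ∧ 0 ≤ tr
        · rw [if_pos hc, if_neg (by omega : ¬ (kr = 0 ∨ tr < 0))]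
          have hsc : mStack nums.length (PvFrame.scan s s kr tr path :: rest)
              = (3 * 2 ^ (nums.length - s) - 2) + mStack nums.length rest := by
            simp [mStack, mFrame]
          rw [ih.2 s s kr tr path rest acc fA' (by rw [hsc]; omega) (by omega)]
          exact runB_fuel nums fB rest _ (fB + 1) (by omega) (by omega)
        · rw [if_neg hc, if_pos (by omega : kr = 0 ∨ tr < 0)]
          rw [runB_fuel nums fB rest acc (fB + 1) (by omega) (by omega)]
          simp
    · -- scan frame
      intro i s kr tr path rest acc fA hm hfA
      have h1 : 1 ≤ 2 ^ (nums.length - i) := Nat.one_le_two_pow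
      have hexp : mStack nums.length (PvFrame.scan i s kr tr path :: rest)
          = (3 * 2 ^ (nums.length - i) - 2) + mStack nums.length rest := by
        simp [mStack, mFrame]
      rw [hexp] at hm
      rw [runB]
      by_cases hin : nums.length ≤ i
      · rw [if_pos hin, (by omega : nums.length - i = 0)]
        rw [runB_fuel nums fB rest acc (fB + 1) (by omega) (by omega)]
        simp [List.range', loopA]
      · rw [if_neg hin]
        have hi : i < nums.length := by omega
        have hpow : 2 ^ (nums.length - i) = 2 * 2 ^ (nums.length - (i+1)) := by
          have : nums.length - i = (nums.length - (i+1)) + 1 := by omega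
          rw [this, pow_succ]; ring
        have h1' : 1 ≤ 2 ^ (nums.length - (i+1)) := Nat.one_le_two_pow
        have hrange : List.range' i (nums.length - i)
            = i :: List.range' (i+1) (nums.length - (i+1)) := by
          rw [(by omega : nums.length - i = (nums.length - (i+1)) + 1), List.range'_succ]
        rw [hrange]
        by_cases hdup : s < i ∧ nums.getD i 0 = nums.getD (i-1) 0
        · rw [if_pos hdup, loopA_cons_dup nums _ i _ s kr tr path hi hdup]
          have hsc : mStack nums.length (PvFrame.scan (i+1) s kr tr path :: rest)
              = (3 * 2 ^ (nums.length - (i+1)) - 2) + mStack nums.length rest := by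
            simp [mStack, mFrame]
          rw [ih.2 (i+1) s kr tr path rest acc fA (by rw [hsc]; omega) (by omega)]
          exact runB_fuel nums fB rest _ (fB + 1) (by omega) (by omega)
        · rw [if_neg hdup]
          by_cases hbrk : nums.getD i 0 * kr > tr ∨ nums.getD (nums.length - 1) 0 * kr < tr
          · rw [if_pos hbrk, loopA_cons_brk nums _ i _ s kr tr path hi hdup hbrk]
            rw [runB_fuel nums fB rest acc (fB + 1) (by omega) (by omega)]
            simp
          · rw [if_neg hbrk, loopA_cons_go nums _ i _ s kr tr path hi hdup hbrk]
            have hst : mStack nums.length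
                (PvFrame.enter (i+1) (kr-1) (tr - nums.getD i 0) (path ++ [nums.getD i 0])
                  :: PvFrame.scan (i+1) s kr tr path :: rest)
                = (3 * 2 ^ (nums.length - (i+1)) - 1)
                  + ((3 * 2 ^ (nums.length - (i+1)) - 2) + mStack nums.length rest) := by
              simp [mStack, mFrame]
            rw [ih.1 (i+1) (kr-1) (tr - nums.getD i 0) (path ++ [nums.getD i 0])
                  (PvFrame.scan (i+1) s kr tr path :: rest) acc fA
                  (by rw [hst]; omega) (by omega) (by omega)]
            have hsc : mStack nums.length (PvFrame.scan (i+1) s kr tr path :: rest)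
                = (3 * 2 ^ (nums.length - (i+1)) - 2) + mStack nums.length rest := by
              simp [mStack, mFrame]
            rw [ih.2 (i+1) s kr tr path rest _ fA (by rw [hsc]; omega) (by omega)]
            rw [runB_fuel nums fB rest _ (fB + 1) (by omega) (by omega)]
            simp

-- ===== VERDICT (by name: the statement is the Claim_ definition above) =====
theorem find_k_sum_backtrack_spec : Claim_equal_find_k_sum_backtrack := by
  intro nums target k _
  unfold Spec_find_k_sum_backtrack find_k_sum_backtrack find_k_sum_backtrack_alt
  have h1 : 1 ≤ 2 ^ nums.length := Nat.one_le_two_pow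
  rw [(run_sem nums (3 * 2 ^ nums.length)).1 0 k target [] [] [] (nums.length + 1)
        (by simp only [mStack, mFrame, List.map_cons, List.map_nil, List.sum_cons, List.sum_nil,
              Nat.sub_zero]; omega)
        (by omega) (by omega)]
  rw [runB_nil]
  simp
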